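-- pv_equiv track=rewrite | github.com/ChariseWalraven/pcap | 2.5/LAB_find_a_word.py | is_word_in_text
-- ===== SOURCE A (Python) =====
-- def is_word_in_text(word: str, text: str) -> bool:
--     text_list = [c for c in text]
--     for c in word:
--         if c in text_list:
--             del text_list[text_list.index(c)]
--
--     num_chars_found = len(text) - len(text_list)
--
--     if num_chars_found != len(word):
--         return False
--     else:
--         return True
-- ===== SOURCE B (Python) =====
-- def is_word_in_text(word: str, text: str) -> bool:
--     sw = sorted(word)
--     st = sorted(text)
--     i = j = 0
--     while i < len(sw) and j < len(st):
--         if sw[i] == st[j]: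
--             i += 1
--             j += 1
--         elif sw[i] > st[j]:
--             j += 1
--         else:
--             return False
--     return i == len(sw)
-- ===== Notes on version B (the rewrite author's own statement) =====
-- stated objective: faster
-- what changed: Replaces the per-character membership scan and first-index deletion over a shrinking text list with sorting both strings once and a single two-pointer merge pass deciding the same sub-multiset containment.
import Mathlib
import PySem

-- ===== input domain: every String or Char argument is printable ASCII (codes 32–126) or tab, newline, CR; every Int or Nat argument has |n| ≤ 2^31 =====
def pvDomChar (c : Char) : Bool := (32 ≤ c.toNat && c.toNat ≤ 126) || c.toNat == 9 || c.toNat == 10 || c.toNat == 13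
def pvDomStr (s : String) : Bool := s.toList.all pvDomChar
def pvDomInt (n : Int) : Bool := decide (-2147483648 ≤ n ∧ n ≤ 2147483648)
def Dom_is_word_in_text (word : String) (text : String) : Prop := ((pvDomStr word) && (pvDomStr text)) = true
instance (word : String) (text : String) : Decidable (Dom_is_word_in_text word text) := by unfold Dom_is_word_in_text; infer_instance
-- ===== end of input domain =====

-- B replaces A's per-character membership scan + first-index deletion over a shrinking copy of text
-- by sorting both strings once and one two-pointer merge pass (alternative decomposition, same results).

-- ===== PORT A =====
-- the 'for c in word' loop over the mutable text_list becomes a foldl;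
-- 'del text_list[text_list.index(c)]' removes the FIRST occurrence of c, which is List.erase
def is_word_in_text (word : String) (text : String) : Bool :=
  let text_list := word.toList.foldl (fun l c => if l.contains c then l.erase c else l) text.toList
  let num_chars_found : Int := (text.toList.length : Int) - (text_list.length : Int)
  if num_chars_found ≠ (word.toList.length : Int) then false else true

-- ===== PORT B =====
-- the while loop over indices i, j becomes recursion on the two list suffixes
def pvMerge : List Char → List Char → Bool
  | [], _ => true
  | _ :: _, [] => false
  | a :: sw, b :: st =>
    if a = b then pvMerge sw st
    else if b < a then pvMerge (a :: sw) st
    else false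

def is_word_in_text_alt (word : String) (text : String) : Bool :=
  pvMerge (PySem.List.sorted word.toList (fun c => c) false)
          (PySem.List.sorted text.toList (fun c => c) false)

-- ===== PRECONDITION & SPEC =====
def Spec_is_word_in_text (word : String) (text : String) (out : Bool) : Prop := out = is_word_in_text_alt word text
instance (word : String) (text : String) (out : Bool) : Decidable (Spec_is_word_in_text word text out) := by unfold Spec_is_word_in_text; infer_instance

-- ===== CLAIM (what is proved, stated in full; the proofs are below) =====
def Claim_equal_is_word_in_text : Prop := ∀ (word : String) (text : String), Dom_is_word_in_text word text → Spec_is_word_in_text word text (is_word_in_text word text)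

-- ===== LEMMAS AND PROOFS =====

-- A's loop as a named recursion, for the induction proofs
def pvALoop : List Char → List Char → List Char
  | [], l => l
  | c :: w, l => pvALoop w (if l.contains c then l.erase c else l)

theorem pvALoop_eq_foldl (w l : List Char) :
    pvALoop w l = w.foldl (fun l c => if l.contains c then l.erase c else l) l := by
  induction w generalizing l with
  | nil => rfl
  | cons c w ih => simp [pvALoop, List.foldl, ih]

theorem pvALoop_len_le (w l : List Char) : (pvALoop w l).length ≤ l.length := by
  induction w generalizing l with
  | nil => simp [pvALoop]
  | cons c w ih =>
    simp only [pvALoop]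
    split
    · exact le_trans (ih _) (List.length_erase_le ..)
    · exact ih l

theorem pvALoop_len_ge (w l : List Char) : l.length ≤ (pvALoop w l).length + w.length := by
  induction w generalizing l with
  | nil => simp [pvALoop]
  | cons c w ih =>
    simp only [pvALoop, List.length_cons]
    by_cases hc : c ∈ l
    · simp only [List.contains_eq_mem, hc, decide_true, if_true]
      have h1 := ih (l.erase c)
      have h2 := List.length_erase_add_one hc
      omega
    · simp only [List.contains_eq_mem, hc, decide_false, Bool.false_eq_true, if_false]
      have := ih l
      omega

theorem subperm_cons_of_mem {c : Char} {w l : List Char} (h : c ∈ l) :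
    List.Subperm (c :: w) l ↔ List.Subperm w (l.erase c) := by
  rw [(List.perm_cons_erase h).subperm_left, List.subperm_cons]

theorem subperm_cons_of_not_mem {b : Char} {l l' : List Char} (h : b ∉ l) :
    List.Subperm l (b :: l') ↔ List.Subperm l l' := by
  constructor
  · intro hs
    rw [List.subperm_ext_iff] at hs ⊢
    intro x hx
    have hxb : b ≠ x := fun he => h (he ▸ hx)
    have hcount := hs x hx
    simpa [List.count_cons, hxb] using hcount
  · exact fun hs => hs.trans (List.sublist_cons_self b l').subperm

theorem pvALoop_iff (w l : List Char) :
    ((l.length : Int) - ((pvALoop w l).length : Int) = (w.length : Int)) ↔ List.Subperm w l := by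
  induction w generalizing l with
  | nil => simp [pvALoop, List.nil_subperm]
  | cons c w ih =>
    simp only [pvALoop, List.length_cons]
    by_cases hc : c ∈ l
    · simp only [List.contains_eq_mem, hc, decide_true, if_true]
      rw [subperm_cons_of_mem hc, ← ih (l.erase c)]
      have hlen := List.length_erase_add_one hc
      have hle := pvALoop_len_le w (l.erase c)
      constructor <;> intro h <;> omega
    · simp only [List.contains_eq_mem, hc, decide_false, Bool.false_eq_true, if_false]
      constructor
      · intro h
        have h1 := pvALoop_len_ge w l
        have h2 := pvALoop_len_le w l
        omega
      · intro h
        exact absurd (h.subset (List.mem_cons_self ..)) hc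

theorem pvMerge_iff (st : List Char) : ∀ sw : List Char,
    sw.Pairwise (· ≤ ·) → st.Pairwise (· ≤ ·) → (pvMerge sw st = true ↔ List.Subperm sw st) := by
  induction st with
  | nil =>
    intro sw _ _
    cases sw with
    | nil => simp [pvMerge]
    | cons a sw =>
      simp only [pvMerge, Bool.false_eq_true, false_iff]
      intro h
      simpa using h.length_le
  | cons b st ih =>
    intro sw hsw hst
    cases sw with
    | nil => simp [pvMerge, List.nil_subperm]
    | cons a sw =>
      simp only [pvMerge]
      by_cases hab : a = b
      · subst hab
        rw [if_pos rfl]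
        rw [ih sw (List.Pairwise.sublist (List.sublist_cons_self ..) hsw) hst.tail,
            List.subperm_cons]
      · rw [if_neg hab]
        by_cases hba : b < a
        · rw [if_pos hba, ih (a :: sw) hsw hst.tail]
          have hbn : b ∉ a :: sw := by
            intro hmem
            have hab' : a ≤ b := by
              rcases List.mem_cons.mp hmem with h' | h'
              · exact le_of_eq h'.symm
              · exact List.rel_of_pairwise_cons hsw h'
            exact absurd hba (not_lt.mpr hab')
          exact (subperm_cons_of_not_mem hbn).symm
        · have halt : a < b := lt_of_le_of_ne (not_lt.mp hba) hab
          rw [if_neg hba]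
          simp only [Bool.false_eq_true, false_iff]
          intro hs
          have ha : a ∈ b :: st := hs.subset (List.mem_cons_self ..)
          rcases List.mem_cons.mp ha with rfl | ha
          · exact lt_irrefl a halt
          · exact absurd halt (not_lt.mpr (List.rel_of_pairwise_cons hst ha))

theorem sorted_pairwise_le (xs : List Char) :
    (PySem.List.sorted xs (fun c => c) false).Pairwise (· ≤ ·) := by
  simpa using PySem.List.sorted_pairwise (xs := xs) (key := fun c : Char => c)

-- ===== VERDICT (by name: the statement is the Claim_ definition above) =====
theorem is_word_in_text_spec : Claim_equal_is_word_in_text := by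
  intro word text _
  unfold Spec_is_word_in_text
  simp only [is_word_in_text, is_word_in_text_alt]
  rw [← pvALoop_eq_foldl, Bool.eq_iff_iff,
      pvMerge_iff _ _ (sorted_pairwise_le _) (sorted_pairwise_le _),
      (PySem.List.sorted_perm ..).subperm_right, (PySem.List.sorted_perm ..).subperm_left,
      ← pvALoop_iff word.toList text.toList]
  constructor
  · intro h
    by_contra hne
    rw [if_pos hne] at h
    exact Bool.false_ne_true h
  · intro h
    rw [if_neg (not_not_intro h)]
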